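-- pv_equiv track=rewrite | github.com/eisha93/cse6140project | Code/branchAndBound.py | choose_length
-- ===== SOURCE A (Python) =====
-- def choose_length(F, G):
-- 	"""Choose best configuration in list of partial solutions based off of length partial solns in F."""
-- 	best = None
-- 	cost = float("inf")
--
-- 	for soln in F:
-- 		if best == None:
-- 			lenbest = 0
-- 		else:
-- 			lenbest = len(best)
-- 		if len(soln) > lenbest:
-- 				best = soln
--
-- 	return best
-- ===== SOURCE B (Python) =====
-- def choose_length(F, G):
--     """Choose best configuration in list of partial solutions based off of length partial solns in F."""
--     maxlen = max((len(s) for s in F), default=0)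
--     if maxlen == 0:
--         return None
--     return next(s for s in F if len(s) == maxlen)
-- ===== Notes on version B (the rewrite author's own statement) =====
-- stated objective: simpler
-- what changed: Replaced the single accumulating best-so-far scan with a two-pass decomposition: compute the maximum length first, then locate the first element of that length (None when the maximum is 0).
import Mathlib
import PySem

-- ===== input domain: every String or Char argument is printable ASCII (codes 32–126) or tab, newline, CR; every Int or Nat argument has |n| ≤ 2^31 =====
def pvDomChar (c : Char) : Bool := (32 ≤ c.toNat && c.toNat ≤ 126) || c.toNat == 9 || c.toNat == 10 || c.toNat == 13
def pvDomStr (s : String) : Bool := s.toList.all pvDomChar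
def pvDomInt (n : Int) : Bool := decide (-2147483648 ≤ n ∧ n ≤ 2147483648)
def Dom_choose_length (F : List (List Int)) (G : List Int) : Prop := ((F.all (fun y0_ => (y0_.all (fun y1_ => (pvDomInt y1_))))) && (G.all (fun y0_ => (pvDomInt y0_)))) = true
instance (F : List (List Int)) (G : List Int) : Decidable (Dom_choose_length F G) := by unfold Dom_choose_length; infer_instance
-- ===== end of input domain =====

-- B replaces A's single best-so-far scan by a two-pass decomposition (max length, then first
-- element of that length); objective: simpler. Return-value equivalence only; G is unused.

-- ===== PORT A =====
-- length of the current `best` (0 when best is still None), as A computes `lenbest`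
def pvLenBest (best : Option (List Int)) : Nat :=
  match best with
  | none => 0
  | some b => b.length

def choose_length (F : List (List Int)) (G : List Int) : Option (List Int) :=
  F.foldl (fun best soln => if soln.length > pvLenBest best then some soln else best) none

-- ===== PORT B =====
def choose_length_alt (F : List (List Int)) (G : List Int) : Option (List Int) :=
  let maxlen := F.foldr (fun s m => max s.length m) 0
  if maxlen = 0 then none
  else F.find? (fun s => s.length == maxlen)

-- ===== PRECONDITION & SPEC =====
def Spec_choose_length (F : List (List Int)) (G : List Int) (out : Option (List Int)) : Prop := out = choose_length_alt F G
instance (F : List (List Int)) (G : List Int) (out : Option (List Int)) : Decidable (Spec_choose_length F G out) := by unfold Spec_choose_length; infer_instance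

-- ===== CLAIM (what is proved, stated in full; the proofs are below) =====
def Claim_equal_choose_length : Prop := ∀ (F : List (List Int)) (G : List Int), Dom_choose_length F G → Spec_choose_length F G (choose_length F G)

-- ===== LEMMAS AND PROOFS =====

-- A's fold from any accumulator equals: the first element of maximal length if that maximum
-- exceeds the accumulator's length, otherwise the accumulator.
theorem choose_length_fold_eq (F : List (List Int)) (b : Option (List Int)) :
    F.foldl (fun best soln => if soln.length > pvLenBest best then some soln else best) b =
      if pvLenBest b < F.foldr (fun s m => max s.length m) 0 then
        F.find? (fun s => s.length == F.foldr (fun s m => max s.length m) 0)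
      else b := by
  induction F generalizing b with
  | nil => simp
  | cons s F ih =>
    simp only [List.foldl_cons, List.foldr_cons]
    rw [ih]
    generalize F.foldr (fun s m => max s.length m) 0 = M
    by_cases hupd : s.length > pvLenBest b
    · rw [if_pos hupd]
      by_cases hF : s.length < M
      · rw [show max s.length M = M by omega,
            List.find?_cons_of_neg (by simp; omega),
            if_pos (show pvLenBest (some s) < M from by simpa [pvLenBest] using hF),
            if_pos (show pvLenBest b < M by omega)]
      · rw [show max s.length M = s.length by omega,
            List.find?_cons_of_pos (by simp),
            if_neg (show ¬ pvLenBest (some s) < M from by simp [pvLenBest]; omega),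
            if_pos (show pvLenBest b < s.length by omega)]
    · rw [if_neg hupd]
      by_cases hb : pvLenBest b < M
      · rw [show max s.length M = M by omega,
            List.find?_cons_of_neg (by simp; omega),
            if_pos hb]
      · rw [if_neg hb, if_neg (show ¬ pvLenBest b < max s.length M by omega)]

-- ===== VERDICT (by name: the statement is the Claim_ definition above) =====
theorem choose_length_spec : Claim_equal_choose_length := by
  intro F G _
  unfold Spec_choose_length choose_length choose_length_alt
  rw [choose_length_fold_eq]
  simp only [pvLenBest]
  by_cases h : F.foldr (fun s m => max s.length m) 0 = 0 <;> simp [h]
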